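-- pv_equiv track=rewrite | github.com/Pikurrot/computational-logic-project | task3.py | main_connector_pos
-- ===== SOURCE A (Python) =====
-- symbols = "&|-%+"  # (and,or,sufficient,necessary,biconditional)
--
-- def main_connector_pos(string):
-- 	# Returns the position of the main connector (the one inside only 0 parentesis). If no main connector, or first character is "¬", returns None
-- 	open_parentheses = 0
-- 	for i in range(len(string)):
-- 		if open_parentheses == 0 and string[i] in symbols:
-- 			return i
-- 		if string[i] == "(":
-- 			open_parentheses += 1
-- 		elif string[i] == ")":
-- 			open_parentheses -= 1
-- 	return None
-- ===== SOURCE B (Python) =====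
-- symbols = "&|-%+"
--
-- def main_connector_pos(string):
-- 	# Two passes: build a table of paren depths before each position, then scan it.
-- 	depths = []
-- 	d = 0
-- 	for c in string:
-- 		depths.append(d)
-- 		d += 1 if c == "(" else -1 if c == ")" else 0
-- 	for i, c in enumerate(string):
-- 		if depths[i] == 0 and c in symbols:
-- 			return i
-- 	return None
-- ===== Notes on version B (the rewrite author's own statement) =====
-- stated objective: alternative
-- what changed: Replaces the single fused loop carrying a running paren counter and early return by two separate passes: first a prefix-depth table is built for every position, then the table is scanned for the first zero-depth connector.
import Mathlib
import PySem

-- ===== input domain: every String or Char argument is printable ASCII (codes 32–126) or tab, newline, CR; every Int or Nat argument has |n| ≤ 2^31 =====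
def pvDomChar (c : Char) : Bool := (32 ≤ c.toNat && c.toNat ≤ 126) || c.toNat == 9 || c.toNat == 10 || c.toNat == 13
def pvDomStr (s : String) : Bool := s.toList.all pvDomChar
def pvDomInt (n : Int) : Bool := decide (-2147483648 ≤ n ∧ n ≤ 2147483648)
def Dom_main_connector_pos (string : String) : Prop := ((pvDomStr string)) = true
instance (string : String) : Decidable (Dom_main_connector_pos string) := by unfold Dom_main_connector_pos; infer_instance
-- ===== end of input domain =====

-- B replaces A's fused counter loop with two passes (build a prefix-depth table, then scan it); alternative decomposition, same cost.


-- ===== PORT A =====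
-- symbols = "&|-%+"; `c in symbols` for a single char is membership in this char list
def pvSymbols : List Char := ['&', '|', '-', '%', '+']

-- A's loop: running open-paren counter, early return at a depth-0 connector
def pvALoop : List Char → Int → Int → Option Int
  | [], _, _ => none
  | c :: rest, i, opens =>
    if opens == 0 && pvSymbols.contains c then some i
    else pvALoop rest (i + 1) (if c == '(' then opens + 1 else if c == ')' then opens - 1 else opens)

def main_connector_pos (string : String) : Option Int :=
  pvALoop string.toList 0 0

-- ===== PORT B =====
-- first pass of Source B: depths.append(d); d updated per char (state: list built so far, current d)
def pvDeltaStep (p : List Int × Int) (c : Char) : List Int × Int :=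
  (p.1 ++ [p.2], p.2 + (if c == '(' then 1 else if c == ')' then -1 else 0))

-- second pass of Source B: for i, c in enumerate(string): if depths[i] == 0 and c in symbols: return i
def pvBScan (depths : List Int) : List (Int × Char) → Option Int
  | [] => none
  | (i, c) :: rest =>
    if depths.getD i.toNat 0 == 0 && pvSymbols.contains c then some i
    else pvBScan depths rest

def main_connector_pos_alt (string : String) : Option Int :=
  let depths := (string.toList.foldl pvDeltaStep ([], 0)).1
  pvBScan depths (PySem.List.enumerate string.toList)

-- ===== PRECONDITION & SPEC =====
def Spec_main_connector_pos (string : String) (out : Option Int) : Prop := out = main_connector_pos_alt string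
instance (string : String) (out : Option Int) : Decidable (Spec_main_connector_pos string out) := by unfold Spec_main_connector_pos; infer_instance

-- ===== CLAIM (what is proved, stated in full; the proofs are below) =====
def Claim_equal_main_connector_pos : Prop := ∀ (string : String), Dom_main_connector_pos string → Spec_main_connector_pos string (main_connector_pos string)

-- ===== LEMMAS AND PROOFS =====

-- the depth table as a direct recursion (proof-side characterisation of the first pass)
def pvDepths (d : Int) : List Char → List Int
  | [] => []
  | c :: cs => d :: pvDepths (d + (if c == '(' then 1 else if c == ')' then -1 else 0)) cs

theorem pvFoldl_depths (cs : List Char) : ∀ (acc : List Int) (d : Int),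
    (cs.foldl pvDeltaStep (acc, d)).1 = acc ++ pvDepths d cs := by
  induction cs with
  | nil => intro acc d; simp [pvDepths]
  | cons c cs ih =>
    intro acc d
    simp [List.foldl, pvDeltaStep, pvDepths, ih]

theorem pvScan_eq_loop (cs : List Char) : ∀ (pre : List Int) (d : Int),
    pvBScan (pre ++ pvDepths d cs) (PySem.List.enumerate cs (pre.length : Int)) =
      pvALoop cs (pre.length : Int) d := by
  induction cs with
  | nil => intro pre d; simp [pvDepths, PySem.List.enumerate, pvBScan, pvALoop]
  | cons c cs ih =>
    intro pre d
    rw [pvDepths, PySem.List.enumerate_cons]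
    have hget : (pre ++ d :: pvDepths (d + (if c == '(' then 1 else if c == ')' then -1 else 0)) cs).getD
        ((pre.length : Int)).toNat 0 = d := by
      simp
    rw [pvBScan, hget, pvALoop]
    by_cases h : (d == 0 && pvSymbols.contains c) = true
    · rw [if_pos h, if_pos h]
    · rw [if_neg h, if_neg h]
      have := ih (pre ++ [d]) (d + (if c == '(' then 1 else if c == ')' then -1 else 0))
      simp only [List.append_assoc, List.singleton_append, List.length_append,
        List.length_singleton] at this
      have hcast : ((pre.length + 1 : Nat) : Int) = (pre.length : Int) + 1 := by push_cast; ring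
      rw [hcast] at this
      rw [this]
      have hupd : (if c == '(' then d + 1 else if c == ')' then d - 1 else d) =
          d + (if c == '(' then 1 else if c == ')' then -1 else 0) := by
        split_ifs <;> ring
      rw [hupd]

-- ===== VERDICT (by name: the statement is the Claim_ definition above) =====
theorem main_connector_pos_spec : Claim_equal_main_connector_pos := by
  intro s _
  unfold Spec_main_connector_pos main_connector_pos main_connector_pos_alt
  rw [pvFoldl_depths s.toList [] 0]
  have := pvScan_eq_loop s.toList [] 0
  simp only [List.length_nil, Nat.cast_zero, List.nil_append] at this
  exact this.symm
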